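-- pv_equiv track=rewrite | github.com/WqyJh/software_engineering | proj3/main.py | sequence_combination
-- ===== SOURCE A (Python) =====
-- def sequence_combination(list, n):
--     l = []
--     length = len(list)
--     for i in range(length):
--         if i + n <= length:
--             l.append(list[i:i + n])
--         else:
--             l.append(list[i:] + list[0:n - length + i])
--     return l
-- ===== SOURCE B (Python) =====
-- def sequence_combination(list, n):
--     doubled = list + list
--     return [doubled[i:i + n] for i in range(len(list))]
-- ===== Notes on version B (the rewrite author's own statement) =====
-- stated objective: simpler
-- what changed: B concatenates the list with itself once and takes one uniform slice doubled[i:i+n] per index, eliminating A's per-index wrap-around branch with its tail-slice + head-slice.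
-- outside the precondition, e.g. on sequence_combination([1, 2, 3], -1): A returns [[1, 2], [], []], B returns [[1, 2, 3, 1, 2], [], []]
import Mathlib
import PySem

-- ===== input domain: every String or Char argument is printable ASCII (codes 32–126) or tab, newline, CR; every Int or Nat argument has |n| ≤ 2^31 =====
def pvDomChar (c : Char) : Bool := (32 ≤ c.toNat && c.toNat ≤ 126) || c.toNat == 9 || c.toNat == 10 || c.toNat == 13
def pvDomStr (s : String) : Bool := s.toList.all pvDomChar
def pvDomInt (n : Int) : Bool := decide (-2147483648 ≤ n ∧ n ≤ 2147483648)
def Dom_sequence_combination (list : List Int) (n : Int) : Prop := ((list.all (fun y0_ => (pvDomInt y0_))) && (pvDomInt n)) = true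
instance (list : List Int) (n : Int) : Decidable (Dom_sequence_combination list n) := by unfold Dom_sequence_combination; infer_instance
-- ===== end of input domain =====

-- ===== PORT A =====
def sequence_combination (list : List Int) (n : Int) : List (List Int) :=
  let length : Int := list.length
  (PySem.List.pyRange 0 length 1).foldl
    (fun l i =>
      if i + n ≤ length then
        l ++ [PySem.List.slice list (some i) (some (i + n))]
      else
        l ++ [PySem.List.slice list (some i) none ++
              PySem.List.slice list (some 0) (some (n - length + i))])
    []

-- ===== PORT B =====
-- B: one doubled buffer, one uniform slice per index (no wrap-around branch).
def sequence_combination_alt (list : List Int) (n : Int) : List (List Int) :=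
  let doubled := list ++ list
  (PySem.List.pyRange 0 (list.length : Int) 1).map
    (fun i => PySem.List.slice doubled (some i) (some (i + n)))

-- ===== PRECONDITION & SPEC =====
-- Pre_ excludes negative n: a negative window length is outside the task's natural
-- domain; there A still returns a value (plain forward slices list[i:i+n] under
-- Python's negative-stop rule) and B slices the doubled buffer — neither value is
-- a 'cyclic window' anyone would specify, so those inputs are excluded.
def Pre_sequence_combination (list : List Int) (n : Int) : Prop := 0 ≤ n
instance (list : List Int) (n : Int) : Decidable (Pre_sequence_combination list n) := by
  unfold Pre_sequence_combination; infer_instance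
def pvWitness_sequence_combination : List Int × Int := ([1, 2, 3], 2)
def Spec_sequence_combination (list : List Int) (n : Int) (out : List (List Int)) : Prop :=
  out = sequence_combination_alt list n
instance (list : List Int) (n : Int) (out : List (List Int)) : Decidable (Spec_sequence_combination list n out) := by
  unfold Spec_sequence_combination; infer_instance

-- ===== CLAIM (what is proved, stated in full; the proofs are below) =====
def Claim_equal_sequence_combination : Prop := ∀ (list : List Int) (n : Int), Dom_sequence_combination list n → Pre_sequence_combination list n → Spec_sequence_combination list n (sequence_combination list n)

-- ===== LEMMAS AND PROOFS =====

-- per-index agreement: for 0 ≤ j < len, window m, A's branch equals the doubled-buffer slice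
theorem pv_window_eq (xs : List Int) (j m : Nat) (hj : j < xs.length) :
    (if ((j : Int) + (m : Int) ≤ (xs.length : Int)) then
        PySem.List.slice xs (some (j : Int)) (some ((j : Int) + (m : Int)))
      else
        PySem.List.slice xs (some (j : Int)) none ++
        PySem.List.slice xs (some 0) (some ((m : Int) - (xs.length : Int) + (j : Int)))) =
    PySem.List.slice (xs ++ xs) (some (j : Int)) (some ((j : Int) + (m : Int))) := by
  have hjle : j ≤ xs.length := le_of_lt hj
  have hlen : (xs.drop j).length = xs.length - j := by simp
  rw [PySem.List.slice_natCast_add (xs ++ xs) j m,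
      List.drop_append_of_le_length hjle, List.take_append]
  split_ifs with h
  · -- no wrap: nothing is taken from the second copy
    have hm : m ≤ xs.length - j := by omega
    have h0 : m - (xs.drop j).length = 0 := by rw [hlen]; omega
    rw [PySem.List.slice_natCast_add xs j m, h0, List.take_zero, List.append_nil]
  · -- wrap: the first copy is exhausted and m + j - len elements come from the second
    have hm : xs.length - j < m := by omega
    have h0 : (m : Int) - (xs.length : Int) + (j : Int) = ((m + j - xs.length : Nat) : Int) := by
      omega
    rw [PySem.List.slice_from xs (Int.natCast_nonneg j), h0,
        PySem.List.slice_zero_start, PySem.List.slice_to_natCast, Int.toNat_natCast]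
    have ht : (xs.drop j).take m = xs.drop j := List.take_of_length_le (by rw [hlen]; omega)
    have h1 : m - (xs.drop j).length = m + j - xs.length := by rw [hlen]; omega
    rw [ht, h1]

theorem sequence_combination_eq_alt (list : List Int) (n : Int) (hn : 0 ≤ n) :
    sequence_combination list n = sequence_combination_alt list n := by
  unfold sequence_combination sequence_combination_alt
  have hsplit :
      (fun (l : List (List Int)) (i : Int) =>
        if i + n ≤ (list.length : Int) then
          l ++ [PySem.List.slice list (some i) (some (i + n))]
        else
          l ++ [PySem.List.slice list (some i) none ++
                PySem.List.slice list (some 0) (some (n - (list.length : Int) + i))]) =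
      (fun (l : List (List Int)) (i : Int) =>
        l ++ [if i + n ≤ (list.length : Int) then
                PySem.List.slice list (some i) (some (i + n))
              else
                PySem.List.slice list (some i) none ++
                PySem.List.slice list (some 0) (some (n - (list.length : Int) + i))]) := by
    funext l i; split_ifs <;> rfl
  simp only [hsplit, PySem.List.foldl_append_singleton_eq_map, List.nil_append]
  apply List.map_congr_left
  intro i hi
  rw [PySem.List.mem_pyRange_one] at hi
  obtain ⟨j, rfl⟩ := Int.eq_ofNat_of_zero_le hi.1
  obtain ⟨m, rfl⟩ := Int.eq_ofNat_of_zero_le hn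
  have hj : j < list.length := by exact_mod_cast hi.2
  exact pv_window_eq list j m hj

-- ===== VERDICT (by name: the statement is the Claim_ definition above) =====
theorem sequence_combination_spec : Claim_equal_sequence_combination := by
  intro list n _ hn
  unfold Spec_sequence_combination
  exact sequence_combination_eq_alt list n hn
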